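-- pv_equiv track=rewrite | github.com/saitiger/DSA | Denomination.py | optimize_coins
-- ===== SOURCE A (Python) =====
-- from collections import Counter
--
-- def optimize_coins(coins):
--     while True:
--         # Step 1: Count the occurrences of each denomination
--         count = Counter(coins)
--
--         # Step 2: Filter denominations with at least two coins
--         candidates = [x for x in count if count[x] >= 2]
--
--         # Break if no candidates remain
--         if not candidates:
--             break
--
--         # Step 3: Find the smallest denomination with at least two coins
--         x = min(candidates)
--
--         # Step 4: Find positions of the first two coins with denomination x
--         positions = [i for i, coin in enumerate(coins) if coin == x]
--         i, j = positions[0], positions[1]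
--
--         # Step 5: Replace coins at positions i and j with a coin of denomination 2 * x at position j
--         coins[j] = 2 * x
--         del coins[i]  # Remove the coin at the earlier position
--
--     return coins
-- ===== SOURCE B (Python) =====
-- def optimize_coins(coins):
--     # Slot/event-driven algorithm: index every value's slots once up front, keep a
--     # sorted list of duplicated values and an alive-mask, and update these
--     # structures incrementally per merge -- the coin list is never rescanned.
--     # (A mutates its argument in place; B does not. Return values agree.)
--     n = len(coins)
--     vals = list(coins)             # value currently held by each original slot
--     alive = [True] * n             # slot still holds a coin?
--     keys = {}                      # value -> ascending list of alive slots holding it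
--     for k, v in enumerate(coins):
--         keys.setdefault(v, []).append(k)
--     cands = sorted(v for v in keys if len(keys[v]) >= 2)   # duplicated values, ascending
--     while cands:
--         x = cands[0]               # smallest duplicated value
--         ks = keys[x]
--         i = ks.pop(0)              # two earliest slots holding x
--         j = ks.pop(0)
--         if len(ks) < 2:
--             cands.pop(0)           # x no longer duplicated
--         alive[i] = False
--         y = 2 * x
--         vals[j] = y
--         lst = keys.setdefault(y, [])
--         p = 0                      # sorted insert of slot j into y's slot list
--         while p < len(lst) and lst[p] < j:
--             p += 1
--         lst.insert(p, j)
--         if len(lst) == 2: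
--             q = 0                  # y just became duplicated: sorted insert into cands
--             while q < len(cands) and cands[q] < y:
--                 q += 1
--             cands.insert(q, y)
--     return [v for v, a in zip(vals, alive) if a]
-- ===== Notes on version B (the rewrite author's own statement) =====
-- stated objective: faster
-- what changed: B builds a value-to-slots index and a sorted list of duplicated values ONCE, then per merge updates only these structures and an alive-mask (pop two earliest slots, sorted-insert the doubled value's slot and candidate), assembling the output at the end -- instead of A's per-round full rescans (Counter rebuild, candidate filter, min, positions scan) of the coin list; B does not mutate its argument (return values agree).
import Mathlib
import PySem

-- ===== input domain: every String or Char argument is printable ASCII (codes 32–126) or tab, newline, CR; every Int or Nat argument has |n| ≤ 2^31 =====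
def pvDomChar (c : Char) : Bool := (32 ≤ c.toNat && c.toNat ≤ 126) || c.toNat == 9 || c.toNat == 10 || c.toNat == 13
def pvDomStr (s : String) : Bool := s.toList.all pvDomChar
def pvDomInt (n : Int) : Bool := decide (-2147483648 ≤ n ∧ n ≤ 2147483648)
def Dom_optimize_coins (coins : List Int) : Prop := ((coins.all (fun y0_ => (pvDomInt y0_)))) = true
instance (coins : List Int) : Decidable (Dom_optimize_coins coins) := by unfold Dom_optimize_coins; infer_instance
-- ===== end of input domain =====

-- B builds a value→slots index and a sorted duplicated-value list once, then updates only these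
-- structures and an alive-mask per merge (no per-round rescan of the coin list); measured faster.
-- A mutates its argument in place, B does not: the equivalence proved is about the return value.


-- ===== PORT A =====
def optimize_coins (coins : List Int) : List Int :=
  -- while True:
  let count := PySem.Dict.counter coins
  let candidates := count.keys.filter (fun v => decide (2 ≤ count.getD v 0))
  if candidates.isEmpty then coins                      -- if not candidates: break
  else
    match PySem.List.min? candidates (fun y => y) with
    | none => coins                                      -- unreachable: candidates ≠ []
    | some x =>
      -- positions = [i for i, coin in enumerate(coins) if coin == x]
      match ((PySem.List.enumerate coins 0).filter (fun p => p.2 == x)).map (·.1) with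
      | i :: j :: _ =>                                   -- i, j = positions[0], positions[1]
        match hq : PySem.List.pop? (PySem.List.pySetD coins j (2*x)) i with
        | some r => optimize_coins r.2                   -- coins[j] = 2*x; del coins[i]
        | none => coins                                  -- unreachable: i is a valid index
      | _ => coins                                       -- unreachable: count x ≥ 2
termination_by coins.length
decreasing_by
  have h1 := PySem.List.length_of_pop?_eq_some _ hq
  rw [PySem.List.length_pySetD] at h1
  omega

-- ===== PORT B =====
-- 'while p < len(lst) and lst[p] < v: p += 1' — the sorted-insert position scan
def pvInsertPos (l : List Int) (v : Int) : Nat :=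
  match l with
  | [] => 0
  | a :: t => if a < v then pvInsertPos t v + 1 else 0

-- the 'while cands:' loop of Source B; fuel = len(coins) bounds the merge count (proved below)
def pvLoop : Nat → List Int → List Bool → PySem.Dict Int (List Int) → List Int →
    List Int × List Bool
  | 0, vals, alive, _, _ => (vals, alive)
  | Nat.succ fuel, vals, alive, keys, cands =>
    match cands with
    | [] => (vals, alive)                               -- loop exit
    | x :: _ =>                                         -- x = cands[0]
      match keys.getD x [] with
      | [] => (vals, alive)                             -- unreachable: Python would raise IndexError
      | i :: tl =>
        match tl with
        | [] => (vals, alive)                           -- unreachable likewise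
        | j :: ks =>                                    -- i = ks.pop(0); j = ks.pop(0)
          let keys1 := keys.insert x ks
          let cands1 := if ks.length < 2 then cands.tail else cands   -- cands.pop(0)
          let alive1 := PySem.List.pySetD alive i false   -- alive[i] = False
          let y := 2 * x
          let vals1 := PySem.List.pySetD vals j y         -- vals[j] = y
          let lst := keys1.getD y []                      -- keys.setdefault(y, [])
          let lst1 := PySem.List.insert lst ((pvInsertPos lst j : Nat) : Int) j  -- lst.insert(p, j)
          let keys2 := keys1.insert y lst1
          let cands2 := if lst1.length == 2
            then PySem.List.insert cands1 ((pvInsertPos cands1 y : Nat) : Int) y -- cands.insert(q, y)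
            else cands1
          pvLoop fuel vals1 alive1 keys2 cands2

def optimize_coins_alt (coins : List Int) : List Int :=
  -- keys.setdefault(v, []).append(k) over enumerate(coins)
  let keys := (PySem.List.enumerate coins 0).foldl
    (fun d p => d.modify p.2 [] (fun l => l ++ [p.1])) PySem.Dict.empty
  -- cands = sorted(v for v in keys if len(keys[v]) >= 2)
  let cands := PySem.List.sorted
    (keys.keys.filter (fun v => decide (2 ≤ (keys.getD v []).length))) (fun y => y) false
  let st := pvLoop coins.length coins (List.replicate coins.length true) keys cands
  -- [v for v, a in zip(vals, alive) if a]
  ((st.1.zip st.2).filter (fun p => p.2)).map (fun p => p.1)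

-- ===== PRECONDITION & SPEC =====
def Spec_optimize_coins (coins : List Int) (out : List Int) : Prop := out = optimize_coins_alt coins
instance (coins : List Int) (out : List Int) : Decidable (Spec_optimize_coins coins out) := by unfold Spec_optimize_coins; infer_instance

-- ===== CLAIM (what is proved, stated in full; the proofs are below) =====
def Claim_equal_optimize_coins : Prop := ∀ (coins : List Int), Dom_optimize_coins coins → Spec_optimize_coins coins (optimize_coins coins)

-- ===== LEMMAS AND PROOFS =====

-- proof-side view: the list A works on is the compaction of B's (vals, alive) state
def pvCompact : List Int → List Bool → List Int
  | [], _ => []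
  | _ :: _, [] => []
  | w :: vs, a :: as => if a then w :: pvCompact vs as else pvCompact vs as

-- ascending alive slots currently holding value x
def pvSlots (x : Int) : List Int → List Bool → List Nat
  | [], _ => []
  | _ :: _, [] => []
  | w :: vs, a :: as => (if a && w == x then [0] else []) ++ (pvSlots x vs as).map (· + 1)

-- position of slot k in the compacted list
def pvRank (alive : List Bool) (k : Nat) : Nat := (alive.take k).count true

-- A's position scan, offset-generalized
def pvOccS (x : Int) (L : List Int) (s : Int) : List Int :=
  ((PySem.List.enumerate L s).filter (fun p => p.2 == x)).map (·.1)

-- the loop invariant tying B's state to the coin list A works on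
def pvInv (vals : List Int) (alive : List Bool) (keys : PySem.Dict Int (List Int))
    (cands : List Int) : Prop :=
  vals.length = alive.length ∧
  (∀ v : Int, keys.getD v [] = (pvSlots v vals alive).map (fun k : Nat => (k : Int))) ∧
  cands.Pairwise (· < ·) ∧
  (∀ v : Int, v ∈ cands ↔ 2 ≤ (pvSlots v vals alive).length)

theorem pv_occS_cons (x w : Int) (L : List Int) (s : Int) :
    pvOccS x (w :: L) s = (if w == x then [s] else []) ++ pvOccS x L (s + 1) := by
  by_cases hw : w = x <;> simp [pvOccS, PySem.List.enumerate_cons, hw]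

theorem pv_rank_zero (alive : List Bool) : pvRank alive 0 = 0 := by simp [pvRank]

theorem pv_rank_succ (a : Bool) (as : List Bool) (k : Nat) :
    pvRank (a :: as) (k + 1) = (if a then 1 else 0) + pvRank as k := by
  cases a <;> simp [pvRank, List.count_cons] <;> omega

theorem pv_mem_slots (x : Int) (vals : List Int) (alive : List Bool) (k : Nat) :
    k ∈ pvSlots x vals alive ↔
      k < vals.length ∧ k < alive.length ∧ alive.getD k false = true ∧ vals.getD k 0 = x := by
  induction vals generalizing alive k with
  | nil => simp [pvSlots]
  | cons w vs ih =>
    cases alive with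
    | nil => simp [pvSlots]
    | cons a as =>
      cases k with
      | zero =>
        cases a <;> by_cases hw : w = x <;>
          simp [pvSlots, hw, ih]
      | succ k =>
        cases a <;> by_cases hw : w = x <;>
          simp [pvSlots, hw, ih, Nat.succ_lt_succ_iff]

theorem pv_slots_pairwise (x : Int) (vals : List Int) (alive : List Bool) :
    (pvSlots x vals alive).Pairwise (· < ·) := by
  induction vals generalizing alive with
  | nil => simp [pvSlots]
  | cons w vs ih =>
    cases alive with
    | nil => simp [pvSlots]
    | cons a as =>
      simp only [pvSlots]
      rw [List.pairwise_append]
      refine ⟨by split <;> simp, (ih as).map _ (by omega), ?_⟩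
      intro p hp q hq
      split at hp <;> simp at hp
      subst hp
      simp at hq
      omega

theorem pv_count_compact (x : Int) (vals : List Int) (alive : List Bool) :
    (pvCompact vals alive).count x = (pvSlots x vals alive).length := by
  induction vals generalizing alive with
  | nil => simp [pvCompact, pvSlots]
  | cons w vs ih =>
    cases alive with
    | nil => simp [pvCompact, pvSlots]
    | cons a as =>
      cases a <;> by_cases hw : w = x <;>
        simp [pvCompact, pvSlots, hw, ih, List.count_cons]

theorem pv_length_compact (vals : List Int) (alive : List Bool)
    (h : vals.length = alive.length) :
    (pvCompact vals alive).length = alive.count true := by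
  induction vals generalizing alive with
  | nil => cases alive <;> simp_all [pvCompact]
  | cons w vs ih =>
    cases alive with
    | nil => simp at h
    | cons a as =>
      simp at h
      cases a <;> simp [pvCompact, List.count_cons, ih as h]

theorem pv_compact_replicate (coins : List Int) :
    pvCompact coins (List.replicate coins.length true) = coins := by
  induction coins with
  | nil => simp [pvCompact]
  | cons w vs ih => simpa [pvCompact, List.replicate_succ] using ih

theorem pv_occS_compact (x : Int) (vals : List Int) (alive : List Bool)
    (h : vals.length = alive.length) (s : Int) :
    pvOccS x (pvCompact vals alive) s
      = (pvSlots x vals alive).map (fun k => s + (pvRank alive k : Int)) := by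
  induction vals generalizing alive s with
  | nil =>
    cases alive with
    | nil => simp [pvOccS, pvCompact, pvSlots, PySem.List.enumerate]
    | cons a as => simp at h
  | cons w vs ih =>
    cases alive with
    | nil => simp at h
    | cons a as =>
      simp only [List.length_cons, Nat.succ_inj] at h
      cases a with
      | true =>
        rw [show pvCompact (w :: vs) (true :: as) = w :: pvCompact vs as from rfl,
          pv_occS_cons, ih as h (s + 1)]
        have hmap : ∀ l : List Nat, (l.map (· + 1)).map (fun k => s + (pvRank (true :: as) k : Int))
            = l.map (fun k => s + 1 + (pvRank as k : Int)) := by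
          intro l
          rw [List.map_map]
          apply List.map_congr_left
          intro k _
          simp [Function.comp, pv_rank_succ]
          push_cast
          ring
        by_cases hw : w = x
        · simp only [pvSlots, hw, beq_self_eq_true, Bool.true_and, if_pos rfl,
            beq_self_eq_true, List.map_append, hmap]
          simp [pvRank]
        · simp only [pvSlots, Bool.true_and]
          rw [if_neg (by simp [hw]), if_neg (by simp [hw])]
          simp only [List.nil_append, hmap]
      | false =>
        rw [show pvCompact (w :: vs) (false :: as) = pvCompact vs as from rfl, ih as h s]
        rw [show pvSlots x (w :: vs) (false :: as) = (pvSlots x vs as).map (· + 1) from by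
          simp [pvSlots]]
        rw [List.map_map]
        apply List.map_congr_left
        intro k _
        simp [Function.comp, pv_rank_succ]

theorem pv_rank_lt_count (alive : List Bool) (k : Nat) (hk : k < alive.length)
    (h : alive.getD k false = true) : pvRank alive k < alive.count true := by
  induction alive generalizing k with
  | nil => simp at hk
  | cons a as ih =>
    cases k with
    | zero =>
      simp [List.getD] at h
      simp [pvRank, h]
    | succ k =>
      simp at hk
      simp [List.getD] at h
      have := ih k hk h
      cases a <;> simp [pv_rank_succ, List.count_cons] <;> omega

theorem pv_rank_mono (alive : List Bool) (i j : Nat) (hij : i < j) (hj : j < alive.length)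
    (hi : alive.getD i false = true) : pvRank alive i < pvRank alive j := by
  induction alive generalizing i j with
  | nil => simp at hj
  | cons a as ih =>
    cases i with
    | zero =>
      simp [List.getD] at hi
      obtain ⟨j', rfl⟩ : ∃ j', j = j' + 1 := ⟨j - 1, by omega⟩
      simp [pv_rank_zero, pv_rank_succ, hi]
    | succ i =>
      obtain ⟨j', rfl⟩ : ∃ j', j = j' + 1 := ⟨j - 1, by omega⟩
      simp at hj
      simp [List.getD] at hi
      have := ih i j' (by omega) hj hi
      cases a <;> simp [pv_rank_succ] <;> omega

theorem pv_count_set_false (alive : List Bool) (k : Nat) (hk : k < alive.length)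
    (h : alive.getD k false = true) :
    alive.count true = (alive.set k false).count true + 1 := by
  induction alive generalizing k with
  | nil => simp at hk
  | cons a as ih =>
    cases k with
    | zero =>
      simp [List.getD] at h
      simp [h, List.count_cons]
    | succ k =>
      simp at hk
      simp [List.getD] at h
      have := ih k hk h
      cases a <;> simp [List.count_cons, List.set] <;> omega

theorem pv_compact_set (vals : List Int) (alive : List Bool) (j : Nat) (y : Int)
    (h : vals.length = alive.length) (hj : j < vals.length) (ha : alive.getD j false = true) :
    pvCompact (vals.set j y) alive = (pvCompact vals alive).set (pvRank alive j) y := by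
  induction vals generalizing alive j with
  | nil => simp at hj
  | cons w vs ih =>
    cases alive with
    | nil => simp at h
    | cons a as =>
      simp only [List.length_cons, Nat.succ_inj] at h
      cases j with
      | zero =>
        simp [List.getD] at ha
        simp [pvCompact, ha, pv_rank_zero]
      | succ j =>
        simp at hj
        simp [List.getD] at ha
        have := ih as j h hj ha
        cases a <;> simp [pvCompact, pv_rank_succ, this, Nat.add_comm 1]

theorem pv_compact_kill (vals : List Int) (alive : List Bool) (i : Nat)
    (h : vals.length = alive.length) (hi : i < alive.length) (ha : alive.getD i false = true) :
    pvCompact vals (alive.set i false) = (pvCompact vals alive).eraseIdx (pvRank alive i) := by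
  induction vals generalizing alive i with
  | nil =>
    cases alive with
    | nil => simp at hi
    | cons a as => simp at h
  | cons w vs ih =>
    cases alive with
    | nil => simp at h
    | cons a as =>
      simp only [List.length_cons, Nat.succ_inj] at h
      cases i with
      | zero =>
        simp [List.getD] at ha
        simp [pvCompact, ha, pv_rank_zero]
      | succ i =>
        simp at hi
        simp [List.getD] at ha
        have := ih as i h hi ha
        cases a <;> simp [pvCompact, pv_rank_succ, this, Nat.add_comm 1]

theorem pv_slots_le_count (x : Int) (vals : List Int) (alive : List Bool) :
    (pvSlots x vals alive).length ≤ alive.count true := by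
  induction vals generalizing alive with
  | nil => simp [pvSlots]
  | cons w vs ih =>
    cases alive with
    | nil => simp [pvSlots]
    | cons a as =>
      have := ih as
      cases a <;> by_cases hw : w = x <;>
        simp [pvSlots, hw, List.count_cons] <;> omega

-- two strictly sorted lists with the same members are equal
theorem pv_sorted_ext {κ : Type} [LinearOrder κ] (l1 l2 : List κ)
    (h1 : l1.Pairwise (· < ·)) (h2 : l2.Pairwise (· < ·))
    (hm : ∀ k, k ∈ l1 ↔ k ∈ l2) : l1 = l2 := by
  have e1 : PySem.List.sorted l1 (fun y => y) = l1 :=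
    PySem.List.sorted_eq_of_perm_of_pairwise_lt _ _ _ (List.Perm.refl l1) h1
  have nd1 : l1.Nodup := List.Pairwise.imp (fun h => ne_of_lt h) h1
  have nd2 : l2.Nodup := List.Pairwise.imp (fun h => ne_of_lt h) h2
  have hp : l2.Perm l1 := (List.perm_ext_iff_of_nodup nd2 nd1).mpr (fun k => (hm k).symm)
  have e2 : PySem.List.sorted l1 (fun y => y) = l2 :=
    PySem.List.sorted_eq_of_perm_of_pairwise_lt _ _ _ hp h2
  rw [← e1, e2]

theorem pv_insertPos_le (l : List Int) (v : Int) : pvInsertPos l v ≤ l.length := by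
  induction l with
  | nil => simp [pvInsertPos]
  | cons a t ih => by_cases hav : a < v <;> simp [pvInsertPos, hav] <;> omega

theorem pv_insert_mem (l : List Int) (v k : Int) (p : Nat) :
    k ∈ l.take p ++ v :: l.drop p ↔ k = v ∨ k ∈ l := by
  constructor
  · intro h
    rcases List.mem_append.mp h with h | h
    · exact Or.inr (List.mem_of_mem_take h)
    · rcases List.mem_cons.mp h with h | h
      · exact Or.inl h
      · exact Or.inr (List.mem_of_mem_drop h)
  · intro h
    rcases h with rfl | h
    · exact List.mem_append.mpr (Or.inr (List.mem_cons_self))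
    · rw [← List.take_append_drop p l] at h
      rcases List.mem_append.mp h with h | h
      · exact List.mem_append.mpr (Or.inl h)
      · exact List.mem_append.mpr (Or.inr (List.mem_cons_of_mem _ h))

theorem pv_insert_sorted (l : List Int) (v : Int) (h : l.Pairwise (· < ·)) (hv : v ∉ l) :
    (l.take (pvInsertPos l v) ++ v :: l.drop (pvInsertPos l v)).Pairwise (· < ·) := by
  induction l with
  | nil => simp [pvInsertPos]
  | cons a t ih =>
    rcases List.pairwise_cons.mp h with ⟨hat, ht⟩
    by_cases hav : a < v
    · rw [show pvInsertPos (a :: t) v = pvInsertPos t v + 1 from by simp [pvInsertPos, hav]]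
      simp only [List.take_succ_cons, List.drop_succ_cons, List.cons_append]
      rw [List.pairwise_cons]
      refine ⟨?_, ih ht (fun hm => hv (List.mem_cons_of_mem _ hm))⟩
      intro b hb
      rcases (pv_insert_mem t v b _).mp hb with rfl | hb
      · exact hav
      · exact hat b hb
    · rw [show pvInsertPos (a :: t) v = 0 from by simp [pvInsertPos, hav]]
      simp only [List.take_zero, List.drop_zero, List.nil_append]
      rw [List.pairwise_cons]
      refine ⟨?_, h⟩
      intro b hb
      have hvb : v ≠ b := by
        rintro rfl
        exact hv hb
      rcases List.mem_cons.mp hb with rfl | hb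
      · omega
      · have := hat b hb
        omega


theorem pv_mem_cand (coins : List Int) (v : Int) :
    v ∈ (PySem.Dict.counter coins).keys.filter
        (fun u => decide (2 ≤ (PySem.Dict.counter coins).getD u 0)) ↔
      2 ≤ coins.count v := by
  rw [List.mem_filter, PySem.Dict.keys_counter, PySem.Set.mem_ofList,
    PySem.Dict.getD_counter]
  constructor
  · intro ⟨_, h⟩
    have := of_decide_eq_true h
    exact_mod_cast this
  · intro h
    refine ⟨List.count_pos_iff.mp (by omega), decide_eq_true ?_⟩
    exact_mod_cast h


theorem pv_getD_set_ne {α : Type} (l : List α) (n k : Nat) (a d : α) (h : n ≠ k) :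
    (l.set n a).getD k d = l.getD k d := by
  simp [List.getD, List.getElem?_set, h]

theorem pv_getD_set_self {α : Type} (l : List α) (k : Nat) (a d : α) (h : k < l.length) :
    (l.set k a).getD k d = a := by
  simp [List.getD, List.getElem?_set, h]

theorem pv_mem_slots_set (v y : Int) (vals : List Int) (alive : List Bool) (iN jN k : Nat)
    (hlen : vals.length = alive.length)
    (hiN : iN < vals.length) (hjN : jN < vals.length) (hij : iN ≠ jN)
    (haj : alive.getD jN false = true) :
    (k ∈ pvSlots v (vals.set jN y) (alive.set iN false) ↔
      (k ≠ iN ∧ k = jN ∧ v = y) ∨ (k ≠ iN ∧ k ≠ jN ∧ k ∈ pvSlots v vals alive)) := by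
  rw [pv_mem_slots, pv_mem_slots]
  simp only [List.length_set]
  by_cases hki : k = iN
  · subst hki
    rw [pv_getD_set_self alive k false false (by omega)]
    simp
  · rw [pv_getD_set_ne alive iN k false false (fun h => hki h.symm)]
    by_cases hkj : k = jN
    · subst hkj
      rw [pv_getD_set_self vals k y 0 hjN]
      constructor
      · rintro ⟨h1, h2, h3, rfl⟩
        exact Or.inl ⟨hki, rfl, rfl⟩
      · rintro (⟨h1, _, rfl⟩ | ⟨_, h2, _⟩)
        · exact ⟨hjN, by omega, haj, rfl⟩
        · exact absurd rfl h2
    · rw [pv_getD_set_ne vals jN k y 0 (fun h => hkj h.symm)]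
      tauto

theorem pv_zip_filter (vals : List Int) (alive : List Bool)
    (h : vals.length = alive.length) :
    ((vals.zip alive).filter (fun p => p.2)).map (fun p => p.1) = pvCompact vals alive := by
  induction vals generalizing alive with
  | nil => simp [pvCompact]
  | cons w vs ih =>
    cases alive with
    | nil => simp at h
    | cons a as =>
      simp only [List.length_cons, Nat.succ_inj] at h
      cases a <;> simp [pvCompact, List.zip_cons_cons, ih as h]

-- the initial index equals the slot lists of the all-alive state
theorem pv_keys0 (coins : List Int) (v : Int) :
    ((PySem.List.enumerate coins 0).foldl
        (fun d p => d.modify p.2 [] (fun l => l ++ [p.1])) PySem.Dict.empty).getD v []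
      = (pvSlots v coins (List.replicate coins.length true)).map (fun k : Nat => (k : Int)) := by
  have hswap : (PySem.List.enumerate coins 0).foldl
      (fun d p => d.modify p.2 [] (fun l => l ++ [p.1])) PySem.Dict.empty
      = ((PySem.List.enumerate coins 0).map Prod.swap).foldl
      (fun d q => d.modify q.1 [] (fun l => l ++ [q.2])) PySem.Dict.empty := by
    rw [List.foldl_map]
    rfl
  rw [hswap, PySem.Dict.getD_foldl_modify_append, PySem.Dict.getD_empty, List.nil_append]
  have hocc : (((PySem.List.enumerate coins 0).map Prod.swap).filter
      (fun p => p.1 == v)).map (·.2) = pvOccS v coins 0 := by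
    rw [List.filter_map, List.map_map]
    rfl
  rw [hocc]
  have hlen : coins.length = (List.replicate coins.length true).length := by simp
  rw [show pvOccS v coins 0
      = pvOccS v (pvCompact coins (List.replicate coins.length true)) 0 from by
    rw [pv_compact_replicate],
    pv_occS_compact v coins _ hlen 0]
  apply List.map_congr_left
  intro k hk
  have hb := (pv_mem_slots v coins _ k).mp hk
  have : pvRank (List.replicate coins.length true) k = k := by
    simp [pvRank, List.take_replicate]
    omega
  rw [this]
  omega

theorem pv_inv0 (coins : List Int) :
    pvInv coins (List.replicate coins.length true)
      ((PySem.List.enumerate coins 0).foldl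
        (fun d p => d.modify p.2 [] (fun l => l ++ [p.1])) PySem.Dict.empty)
      (PySem.List.sorted
        ((((PySem.List.enumerate coins 0).foldl
            (fun d p => d.modify p.2 [] (fun l => l ++ [p.1])) PySem.Dict.empty).keys).filter
          (fun v => decide (2 ≤ (((PySem.List.enumerate coins 0).foldl
            (fun d p => d.modify p.2 [] (fun l => l ++ [p.1])) PySem.Dict.empty).getD v []).length)))
        (fun y => y) false) := by
  set keys0 := (PySem.List.enumerate coins 0).foldl
    (fun d p => d.modify p.2 [] (fun l => l ++ [p.1])) PySem.Dict.empty with hkeys0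
  set flt := keys0.keys.filter
    (fun v => decide (2 ≤ (keys0.getD v []).length)) with hflt
  have hperm : (PySem.List.sorted flt (fun y => y) false).Perm flt :=
    PySem.List.sorted_perm flt (fun y => y) false
  have hndk : keys0.keys.Nodup := by
    rw [hkeys0]
    exact PySem.Dict.nodup_keys_foldl_modify_key _ _ _ _ _ (by simp [PySem.Dict.keys_empty])
  have hnd : (PySem.List.sorted flt (fun y => y) false).Nodup := by
    refine hperm.symm.nodup ?_
    rw [hflt]
    exact List.Nodup.filter _ hndk
  refine ⟨by simp, fun v => pv_keys0 coins v, ?_, ?_⟩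
  · have hle := PySem.List.sorted_pairwise flt (fun y => y)
    have := List.pairwise_and_iff.mpr ⟨hle, hnd⟩
    exact this.imp (fun h => lt_of_le_of_ne h.1 h.2)
  · intro v
    rw [hperm.mem_iff, hflt, List.mem_filter]
    have hkk : keys0.keys = PySem.Set.ofList coins := by
      rw [hkeys0, PySem.Dict.keys_foldl_modify_key _ (fun p : Int × Int => p.2) [] _ _,
        PySem.Dict.keys_empty, PySem.Set.update_nil_left, PySem.List.map_snd_enumerate]
    rw [hkk, PySem.Set.mem_ofList, pv_keys0 coins v, List.length_map]
    constructor
    · rintro ⟨_, h⟩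
      exact of_decide_eq_true h
    · intro h
      refine ⟨?_, decide_eq_true h⟩
      have hne : pvSlots v coins (List.replicate coins.length true) ≠ [] := by
        intro hnil
        rw [hnil] at h
        simp at h
      obtain ⟨k, hk⟩ := List.exists_mem_of_ne_nil _ hne
      obtain ⟨h1, h2, h3, h4⟩ := (pv_mem_slots v coins _ k).mp hk
      rw [List.getD_eq_getElem coins 0 h1] at h4
      exact h4 ▸ List.getElem_mem h1

theorem pv_cast_pairwise (l : List Nat) (h : l.Pairwise (· < ·)) :
    (l.map (fun k : Nat => (k : Int))).Pairwise (· < ·) :=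
  List.pairwise_map.mpr (h.imp (fun hab => by exact_mod_cast hab))

-- A stops as soon as no value is duplicated
theorem pv_A_stop (vals : List Int) (alive : List Bool)
    (h : ∀ v : Int, (pvSlots v vals alive).length ≤ 1) :
    optimize_coins (pvCompact vals alive) = pvCompact vals alive := by
  rw [optimize_coins]
  have hemp : ((PySem.Dict.counter (pvCompact vals alive)).keys.filter
      (fun u => decide (2 ≤ (PySem.Dict.counter (pvCompact vals alive)).getD u 0))).isEmpty := by
    rw [List.isEmpty_iff]
    refine List.eq_nil_iff_forall_not_mem.mpr (fun v hv => ?_)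
    have h2 := (pv_mem_cand _ v).mp hv
    rw [pv_count_compact] at h2
    have := h v
    omega
  rw [if_pos hemp]

-- one merge round of A, seen on the compacted state
theorem pv_A_round (vals : List Int) (alive : List Bool) (x : Int) (iN jN : Nat) (ksN : List Nat)
    (hlen : vals.length = alive.length)
    (hslots : pvSlots x vals alive = iN :: jN :: ksN)
    (hmin : ∀ v : Int, 2 ≤ (pvSlots v vals alive).length → x ≤ v) :
    optimize_coins (pvCompact vals alive)
      = optimize_coins (pvCompact (vals.set jN (2 * x)) (alive.set iN false)) := by
  obtain ⟨hiv, hia, hiaT, hix⟩ := (pv_mem_slots x vals alive iN).mp (by rw [hslots]; simp)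
  obtain ⟨hjv, hja, hjaT, hjx⟩ := (pv_mem_slots x vals alive jN).mp (by rw [hslots]; simp)
  have hpw := pv_slots_pairwise x vals alive
  rw [hslots] at hpw
  have hij : iN < jN := (List.pairwise_cons.mp hpw).1 jN (by simp)
  conv_lhs => rw [optimize_coins]
  have hxc : x ∈ (PySem.Dict.counter (pvCompact vals alive)).keys.filter
      (fun u => decide (2 ≤ (PySem.Dict.counter (pvCompact vals alive)).getD u 0)) := by
    rw [pv_mem_cand, pv_count_compact, hslots]
    simp
  have hemp : ¬ (((PySem.Dict.counter (pvCompact vals alive)).keys.filter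
      (fun u => decide (2 ≤ (PySem.Dict.counter (pvCompact vals alive)).getD u 0))).isEmpty = true) := by
    rw [List.isEmpty_iff]
    intro h
    rw [h] at hxc
    simp at hxc
  rw [if_neg hemp]
  have hminx : PySem.List.min? ((PySem.Dict.counter (pvCompact vals alive)).keys.filter
      (fun u => decide (2 ≤ (PySem.Dict.counter (pvCompact vals alive)).getD u 0)))
      (fun y => y) = some x := by
    cases hm : PySem.List.min? ((PySem.Dict.counter (pvCompact vals alive)).keys.filter
      (fun u => decide (2 ≤ (PySem.Dict.counter (pvCompact vals alive)).getD u 0)))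
      (fun y => y) with
    | none =>
      rw [PySem.List.min?_eq_none_iff] at hm
      rw [hm] at hxc
      simp at hxc
    | some m =>
      have hmm := PySem.List.min?_mem hm
      have h1 := PySem.List.min?_isMin hm x hxc
      rw [pv_mem_cand, pv_count_compact] at hmm
      have h2 := hmin m hmm
      simp only [Option.some.injEq]
      omega
  rw [hminx]
  dsimp only
  have hocc : ((PySem.List.enumerate (pvCompact vals alive) 0).filter
      (fun p => p.2 == x)).map (·.1)
      = ((pvRank alive iN : Int)) :: ((pvRank alive jN : Int))
        :: (ksN.map (fun k : Nat => ((pvRank alive k : Nat) : Int))) := by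
    show pvOccS x (pvCompact vals alive) 0 = _
    rw [pv_occS_compact x vals alive hlen 0, hslots]
    simp
  rw [hocc]
  dsimp only
  have hrij : pvRank alive iN < pvRank alive jN := pv_rank_mono alive iN jN hij hja hiaT
  have hrjc : pvRank alive jN < alive.count true := pv_rank_lt_count alive jN hja hjaT
  have hlenL : (pvCompact vals alive).length = alive.count true := pv_length_compact vals alive hlen
  rw [PySem.List.pySetD_natCast]
  have hpop := PySem.List.pop?_natCast
    ((pvCompact vals alive).set (pvRank alive jN) (2*x)) (pvRank alive iN)
    (by simp only [List.length_set]; omega)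
  rw [hpop]
  dsimp only
  congr 1
  rw [pv_compact_kill (vals.set jN (2*x)) alive iN (by simpa using hlen) hia hiaT,
    pv_compact_set vals alive jN (2*x) hlen hjv hjaT]

-- B's one-round state update, exactly as in the port's let-chain
def pvNextState (vals : List Int) (alive : List Bool) (keys : PySem.Dict Int (List Int))
    (cands : List Int) (x i j : Int) (ks : List Int) :
    List Int × List Bool × PySem.Dict Int (List Int) × List Int :=
  let keys1 := keys.insert x ks
  let cands1 := if ks.length < 2 then cands.tail else cands
  let alive1 := PySem.List.pySetD alive i false
  let vals1 := PySem.List.pySetD vals j (2*x)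
  let lst := keys1.getD (2*x) []
  let lst1 := PySem.List.insert lst ((pvInsertPos lst j : Nat) : Int) j
  let keys2 := keys1.insert (2*x) lst1
  let cands2 := if lst1.length == 2
    then PySem.List.insert cands1 ((pvInsertPos cands1 (2*x) : Nat) : Int) (2*x)
    else cands1
  (vals1, alive1, keys2, cands2)

theorem pv_loop_red (fuel : Nat) (vals : List Int) (alive : List Bool)
    (keys : PySem.Dict Int (List Int)) (x : Int) (rest : List Int) (i j : Int) (ks : List Int)
    (hkx : keys.getD x [] = i :: j :: ks) :
    pvLoop (fuel + 1) vals alive keys (x :: rest)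
      = pvLoop fuel (pvNextState vals alive keys (x :: rest) x i j ks).1
          (pvNextState vals alive keys (x :: rest) x i j ks).2.1
          (pvNextState vals alive keys (x :: rest) x i j ks).2.2.1
          (pvNextState vals alive keys (x :: rest) x i j ks).2.2.2 := by
  conv_lhs => rw [pvLoop]
  rw [hkx]
  rfl

theorem pv_inv_step (vals : List Int) (alive : List Bool) (keys : PySem.Dict Int (List Int))
    (x : Int) (rest : List Int) (iN jN : Nat) (ksN : List Nat)
    (hinv : pvInv vals alive keys (x :: rest))
    (hslots : pvSlots x vals alive = iN :: jN :: ksN) :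
    pvInv (pvNextState vals alive keys (x :: rest) x (iN : Int) (jN : Int)
        (ksN.map (fun k : Nat => (k : Int)))).1
      (pvNextState vals alive keys (x :: rest) x (iN : Int) (jN : Int)
        (ksN.map (fun k : Nat => (k : Int)))).2.1
      (pvNextState vals alive keys (x :: rest) x (iN : Int) (jN : Int)
        (ksN.map (fun k : Nat => (k : Int)))).2.2.1
      (pvNextState vals alive keys (x :: rest) x (iN : Int) (jN : Int)
        (ksN.map (fun k : Nat => (k : Int)))).2.2.2 := by
  obtain ⟨hlen, hkeys, hsort, hcand⟩ := hinv
  obtain ⟨hiv, hia, hiaT, hix⟩ := (pv_mem_slots x vals alive iN).mp (by rw [hslots]; simp)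
  obtain ⟨hjv, hja, hjaT, hjx⟩ := (pv_mem_slots x vals alive jN).mp (by rw [hslots]; simp)
  have hpw := pv_slots_pairwise x vals alive
  rw [hslots] at hpw
  rw [List.pairwise_cons] at hpw
  obtain ⟨hifst, hpw2⟩ := hpw
  rw [List.pairwise_cons] at hpw2
  obtain ⟨hjfst, hkspw⟩ := hpw2
  have hij : iN < jN := hifst jN (by simp)
  have hxr : ∀ v ∈ rest, x < v := (List.pairwise_cons.mp hsort).1
  have hrest : rest.Pairwise (· < ·) := (List.pairwise_cons.mp hsort).2
  -- the list the doubled value's slots had, minus the two merged slots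
  set S' : List Nat := if 2 * x = x then ksN else pvSlots (2*x) vals alive with hS'
  have hS'pw : S'.Pairwise (· < ·) := by
    rw [hS']
    split
    · exact hkspw
    · exact pv_slots_pairwise (2*x) vals alive
  have hS'mem : ∀ k : Nat, k ∈ S' ↔ (k ∈ pvSlots (2*x) vals alive ∧ k ≠ iN ∧ k ≠ jN) := by
    intro k
    rw [hS']
    split
    · rename_i hyx
      rw [hyx, hslots]
      constructor
      · intro hk
        refine ⟨by simp [hk], ?_, ?_⟩
        · intro hki
          subst hki
          exact absurd (hifst k (by simp [hk])) (by omega)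
        · intro hkj
          subst hkj
          exact absurd (hjfst k hk) (by omega)
      · rintro ⟨hk, hki, hkj⟩
        simp at hk
        tauto
    · rename_i hyx
      constructor
      · intro hk
        obtain ⟨h1, h2, h3, h4⟩ := (pv_mem_slots _ vals alive k).mp hk
        refine ⟨hk, ?_, ?_⟩
        · rintro rfl
          rw [h4] at hix
          exact hyx hix
        · rintro rfl
          rw [h4] at hjx
          exact hyx hjx
      · tauto
  have hjS' : (jN : Int) ∉ S'.map (fun k : Nat => (k : Int)) := by
    intro hm
    obtain ⟨k, hk, hkk⟩ := List.mem_map.mp hm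
    have : k = jN := by exact_mod_cast hkk
    subst this
    exact ((hS'mem k).mp hk).2.2 rfl
  -- identify the dict entry read for 2*x
  have hlst : (keys.insert x (ksN.map (fun k : Nat => (k : Int)))).getD (2*x) []
      = S'.map (fun k : Nat => (k : Int)) := by
    rw [PySem.Dict.getD_insert, hS']
    split
    · rfl
    · exact hkeys (2*x)
  have hmemset := fun (v : Int) (k : Nat) =>
    pv_mem_slots_set v (2*x) vals alive iN jN k hlen hiv hjv (by omega) hjaT
  simp only [pvNextState, PySem.List.pySetD_natCast, List.tail_cons, hlst]
  set p := pvInsertPos (S'.map (fun k : Nat => (k : Int))) (jN : Int) with hp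
  have hins : PySem.List.insert (S'.map (fun k : Nat => (k : Int))) ((p : Nat) : Int) (jN : Int)
      = (S'.map (fun k : Nat => (k : Int))).take p
        ++ (jN : Int) :: (S'.map (fun k : Nat => (k : Int))).drop p :=
    PySem.List.insert_natCast _ p _ (pv_insertPos_le _ _)
  rw [hins]
  set L1 := (S'.map (fun k : Nat => (k : Int))).take p
    ++ (jN : Int) :: (S'.map (fun k : Nat => (k : Int))).drop p with hL1
  have hL1pw : L1.Pairwise (· < ·) :=
    pv_insert_sorted _ _ (pv_cast_pairwise S' hS'pw) hjS'
  have hL1mem : ∀ m : Int, m ∈ L1 ↔ m = (jN : Int) ∨ m ∈ S'.map (fun k : Nat => (k : Int)) :=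
    fun m => pv_insert_mem _ _ m p
  have hL1len : L1.length = S'.length + 1 := by
    rw [hL1]
    simp
  -- the new slot lists
  have hynew : (pvSlots (2*x) (vals.set jN (2*x)) (alive.set iN false)).map
      (fun k : Nat => (k : Int)) = L1 := by
    apply pv_sorted_ext
    · exact pv_cast_pairwise _ (pv_slots_pairwise _ _ _)
    · exact hL1pw
    · intro m
      rw [hL1mem m]
      constructor
      · intro hm
        obtain ⟨k, hk, rfl⟩ := List.mem_map.mp hm
        rcases (hmemset (2*x) k).mp hk with ⟨_, rfl, _⟩ | ⟨hki, hkj, hks⟩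
        · exact Or.inl rfl
        · exact Or.inr (List.mem_map.mpr ⟨k, (hS'mem k).mpr ⟨hks, hki, hkj⟩, rfl⟩)
      · rintro (rfl | hm)
        · refine List.mem_map.mpr ⟨jN, ?_, rfl⟩
          rw [hmemset (2*x) jN]
          exact Or.inl ⟨by omega, rfl, rfl⟩
        · obtain ⟨k, hk, rfl⟩ := List.mem_map.mp hm
          obtain ⟨hks, hki, hkj⟩ := (hS'mem k).mp hk
          exact List.mem_map.mpr ⟨k, (hmemset (2*x) k).mpr (Or.inr ⟨hki, hkj, hks⟩), rfl⟩
  have hxnew : 2*x ≠ x → pvSlots x (vals.set jN (2*x)) (alive.set iN false) = ksN := by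
    intro hyx
    apply pv_sorted_ext _ _ (pv_slots_pairwise _ _ _) hkspw
    intro k
    rw [hmemset x k]
    constructor
    · rintro (⟨_, rfl, h⟩ | ⟨hki, hkj, hks⟩)
      · exact absurd h.symm hyx
      · rw [hslots] at hks
        simp at hks
        tauto
    · intro hk
      have hjk := hjfst k hk
      refine Or.inr ⟨by omega, by omega, ?_⟩
      rw [hslots]
      simp [hk]
  have hvnew : ∀ v : Int, v ≠ x → v ≠ 2*x →
      pvSlots v (vals.set jN (2*x)) (alive.set iN false) = pvSlots v vals alive := by
    intro v hvx hvy
    apply pv_sorted_ext _ _ (pv_slots_pairwise _ _ _) (pv_slots_pairwise _ _ _)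
    intro k
    rw [hmemset v k]
    constructor
    · rintro (⟨_, rfl, h⟩ | ⟨_, _, hk⟩)
      · exact absurd h hvy
      · exact hk
    · intro hk
      obtain ⟨h1, h2, h3, h4⟩ := (pv_mem_slots v vals alive k).mp hk
      refine Or.inr ⟨?_, ?_, hk⟩
      · rintro rfl
        rw [h4] at hix
        exact hvx hix
      · rintro rfl
        rw [h4] at hjx
        exact hvx hjx
  have hLy : (pvSlots (2*x) (vals.set jN (2*x)) (alive.set iN false)).length = S'.length + 1 := by
    have := congrArg List.length hynew
    simpa [hL1len] using this
  -- candidate-list facts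
  set C1 := if (ksN.map (fun k : Nat => (k : Int))).length < 2 then rest else x :: rest with hC1
  have hC1pw : C1.Pairwise (· < ·) := by
    rw [hC1]
    split
    · exact hrest
    · exact hsort
  have hC1mem : ∀ v : Int, v ∈ C1 ↔ v ∈ x :: rest ∧ (ksN.length < 2 → v ≠ x) := by
    intro v
    rw [hC1]
    split
    · rename_i hks2
      simp only [List.length_map] at hks2
      constructor
      · intro hv
        exact ⟨List.mem_cons_of_mem _ hv, fun _ => by have := hxr v hv; omega⟩
      · rintro ⟨hv, himp⟩
        rcases List.mem_cons.mp hv with rfl | hv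
        · exact absurd rfl (himp hks2)
        · exact hv
    · rename_i hks2
      simp only [List.length_map] at hks2
      exact ⟨fun hv => ⟨hv, fun h => absurd h hks2⟩, fun h => h.1⟩
  have hyC1 : S'.length = 1 → 2*x ∉ C1 := by
    intro h1 hmem
    obtain ⟨hmem2, himp⟩ := (hC1mem (2*x)).mp hmem
    by_cases hyx : 2*x = x
    · have hkn : S' = ksN := by rw [hS', if_pos hyx]
      have : ksN.length = 1 := by rw [← hkn]; exact h1
      exact (himp (by omega)) hyx
    · rcases List.mem_cons.mp hmem2 with h | h
      · exact hyx h
      · have := (hcand (2*x)).mp (List.mem_cons_of_mem _ h)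
        have hS'len : S'.length = (pvSlots (2*x) vals alive).length := by
          rw [hS', if_neg hyx]
        omega
  refine ⟨by simp [hlen], ?_, ?_, ?_⟩
  · -- the dict invariant
    intro v
    rw [PySem.Dict.getD_insert, PySem.Dict.getD_insert]
    by_cases hvy : v = 2*x
    · rw [if_pos hvy, hvy, hynew]
    · rw [if_neg hvy]
      by_cases hvx : v = x
      · rw [if_pos hvx, hvx, hxnew (fun h => hvy (hvx ▸ h.symm))]
      · rw [if_neg hvx, hkeys v, hvnew v hvx hvy]
  · -- the candidate list stays strictly sorted
    split
    · rename_i hl2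
      rw [PySem.List.insert_natCast _ _ _ (pv_insertPos_le _ _)]
      have hS1 : S'.length = 1 := by
        simp only [hL1len, beq_iff_eq] at hl2
        omega
      exact pv_insert_sorted _ _ hC1pw (hyC1 hS1)
    · exact hC1pw
  · -- candidate membership characterizes duplicated values
    intro v
    have hnewlen : (pvSlots v (vals.set jN (2*x)) (alive.set iN false)).length
        = if v = 2*x then S'.length + 1
          else if v = x then ksN.length else (pvSlots v vals alive).length := by
      by_cases hvy : v = 2*x
      · rw [if_pos hvy, hvy, hLy]
      · rw [if_neg hvy]
        by_cases hvx : v = x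
        · rw [if_pos hvx, hvx, hxnew (fun h => hvy (hvx ▸ h.symm))]
        · rw [if_neg hvx, hvnew v hvx hvy]
    split
    · rename_i hl2
      rw [PySem.List.insert_natCast _ _ _ (pv_insertPos_le _ _)]
      rw [pv_insert_mem _ _ v (pvInsertPos C1 (2*x))]
      have hS1 : S'.length = 1 := by
        simp only [hL1len, beq_iff_eq] at hl2
        omega
      rw [hnewlen]
      constructor
      · rintro (rfl | hv)
        · rw [if_pos rfl]
          omega
        · obtain ⟨hv2, himp⟩ := (hC1mem v).mp hv
          by_cases hvy : v = 2*x
          · rw [if_pos hvy]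
            omega
          · rw [if_neg hvy]
            by_cases hvx : v = x
            · rw [if_pos hvx]
              subst hvx
              by_cases hk2 : ksN.length < 2
              · exact absurd rfl (himp hk2)
              · omega
            · rw [if_neg hvx]
              exact (hcand v).mp hv2
      · intro hge
        by_cases hvy : v = 2*x
        · exact Or.inl hvy
        · rw [if_neg hvy] at hge
          refine Or.inr ((hC1mem v).mpr ?_)
          by_cases hvx : v = x
          · rw [if_pos hvx] at hge
            subst hvx
            exact ⟨List.mem_cons_self, fun h => absurd hge (by omega)⟩
          · rw [if_neg hvx] at hge
            exact ⟨(hcand v).mpr hge, fun _ => hvx⟩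
    · rename_i hl2
      have hS1 : S'.length ≠ 1 := by
        simp only [hL1len, beq_iff_eq] at hl2
        omega
      rw [hnewlen, hC1mem v]
      by_cases hvy : v = 2*x
      · rw [if_pos hvy]
        subst hvy
        by_cases hyx : 2*x = x
        · have hkn : S' = ksN := by rw [hS', if_pos hyx]
          have hSk : S'.length = ksN.length := by rw [hkn]
          constructor
          · rintro ⟨hv2, himp⟩
            rcases List.mem_cons.mp hv2 with h | h
            · by_cases hk2 : ksN.length < 2
              · exact absurd h (himp (by omega))
              · omega
            · have := hxr _ h
              omega
          · intro hge
            refine ⟨by rw [hyx]; exact List.mem_cons_self, fun h => absurd h (by omega)⟩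
        · have hS'len : S'.length = (pvSlots (2*x) vals alive).length := by
            rw [hS', if_neg hyx]
          constructor
          · rintro ⟨hv2, _⟩
            rcases List.mem_cons.mp hv2 with h | h
            · exact absurd h hyx
            · have := (hcand (2*x)).mp (List.mem_cons_of_mem _ h)
              omega
          · intro hge
            refine ⟨(hcand (2*x)).mpr (by omega), fun _ => hyx⟩
      · rw [if_neg hvy]
        by_cases hvx : v = x
        · rw [if_pos hvx]
          constructor
          · rintro ⟨_, himp⟩
            by_cases hk2 : ksN.length < 2
            · exact absurd hvx (himp hk2)
            · omega
          · intro hge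
            exact ⟨by rw [hvx]; exact List.mem_cons_self, fun h => absurd hge (by omega)⟩
        · rw [if_neg hvx]
          rw [← hcand v]
          exact ⟨fun h => h.1, fun h => ⟨h, fun _ => hvx⟩⟩

theorem pv_main (fuel : Nat) : ∀ (vals : List Int) (alive : List Bool)
    (keys : PySem.Dict Int (List Int)) (cands : List Int),
    pvInv vals alive keys cands → alive.count true ≤ fuel + 1 →
    (pvLoop fuel vals alive keys cands).1.length = (pvLoop fuel vals alive keys cands).2.length ∧
    pvCompact (pvLoop fuel vals alive keys cands).1 (pvLoop fuel vals alive keys cands).2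
      = optimize_coins (pvCompact vals alive) := by
  induction fuel with
  | zero =>
    intro vals alive keys cands hinv hcnt
    obtain ⟨hlen, hkeys, hsort, hcand⟩ := hinv
    refine ⟨hlen, ?_⟩
    have hstop : ∀ v : Int, (pvSlots v vals alive).length ≤ 1 := by
      intro v
      have := pv_slots_le_count v vals alive
      omega
    exact (pv_A_stop vals alive hstop).symm
  | succ fuel ih =>
    intro vals alive keys cands hinv hcnt
    obtain ⟨hlen, hkeys, hsort, hcand⟩ := hinv
    cases cands with
    | nil =>
      refine ⟨hlen, ?_⟩
      have hstop : ∀ v : Int, (pvSlots v vals alive).length ≤ 1 := by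
        intro v
        by_contra hv
        have := (hcand v).mpr (by omega)
        simp at this
      exact (pv_A_stop vals alive hstop).symm
    | cons x rest =>
      have hx2 : 2 ≤ (pvSlots x vals alive).length := (hcand x).mp List.mem_cons_self
      obtain ⟨iN, jN, ksN, hslots⟩ : ∃ iN jN ksN, pvSlots x vals alive = iN :: jN :: ksN := by
        cases h : pvSlots x vals alive with
        | nil => rw [h] at hx2; simp at hx2
        | cons a t =>
          cases t with
          | nil => rw [h] at hx2; simp at hx2
          | cons b u => exact ⟨a, b, u, rfl⟩
      have hkx : keys.getD x []
          = (iN : Int) :: (jN : Int) :: ksN.map (fun k : Nat => (k : Int)) := by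
        rw [hkeys x, hslots]
        rfl
      obtain ⟨hiv, hia, hiaT, hix⟩ := (pv_mem_slots x vals alive iN).mp (by rw [hslots]; simp)
      rw [pv_loop_red fuel vals alive keys x rest _ _ _ hkx]
      have hinv1 := pv_inv_step vals alive keys x rest iN jN ksN
        ⟨hlen, hkeys, hsort, hcand⟩ hslots
      have hmin : ∀ v : Int, 2 ≤ (pvSlots v vals alive).length → x ≤ v := by
        intro v hv
        have hvm := (hcand v).mpr hv
        rcases List.mem_cons.mp hvm with rfl | hvm
        · exact le_refl v
        · exact le_of_lt ((List.pairwise_cons.mp hsort).1 v hvm)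
      rw [pv_A_round vals alive x iN jN ksN hlen hslots hmin]
      have hst1 : (pvNextState vals alive keys (x :: rest) x (iN : Int) (jN : Int)
          (ksN.map (fun k : Nat => (k : Int)))).1 = vals.set jN (2*x) := by
        simp [pvNextState]
      have hst2 : (pvNextState vals alive keys (x :: rest) x (iN : Int) (jN : Int)
          (ksN.map (fun k : Nat => (k : Int)))).2.1 = alive.set iN false := by
        simp [pvNextState]
      have hcnt1 : (alive.set iN false).count true ≤ fuel + 1 := by
        have := pv_count_set_false alive iN hia hiaT
        omega
      obtain ⟨ha, hb⟩ := ih _ _ _ _ hinv1 (by rw [hst2]; exact hcnt1)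
      refine ⟨ha, ?_⟩
      rw [hb, hst1, hst2]

-- ===== VERDICT (by name: the statement is the Claim_ definition above) =====
theorem optimize_coins_spec : Claim_equal_optimize_coins := by
  intro coins _
  unfold Spec_optimize_coins optimize_coins_alt
  have hinv := pv_inv0 coins
  have hcnt : (List.replicate coins.length true).count true ≤ coins.length + 1 := by
    simp [List.count_replicate]
  obtain ⟨hlen, heq⟩ := pv_main coins.length coins (List.replicate coins.length true) _ _ hinv hcnt
  simp only []
  rw [pv_zip_filter _ _ hlen, heq, pv_compact_replicate]
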